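-- pv_equiv track=rewrite | github.com/A60874022/sarafan_test1 | test1.py | sequence_calculation
-- ===== SOURCE A (Python) =====
-- def sequence_calculation(n):
--     """Функция вывода n первых
--     элементов последовательности 122333444455555…
--     (число повторяется столько раз, чему оно равно."""
--     temp = []
--     i = 1
--     while len(temp) < n:
--         number = [i] * i
--         temp.extend(number)
--         i += 1
--     sequence = [str(number) for number in temp][:n]
--     return ''.join(sequence)
-- ===== SOURCE B (Python) =====
-- def _isqrt(x):
--     """Floor square root by binary search (invariant lo*lo <= x < hi*hi)."""
--     lo, hi = 0, x + 1
--     while hi - lo > 1: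
--         mid = (lo + hi) // 2
--         if mid * mid <= x:
--             lo = mid
--         else:
--             hi = mid
--     return lo
--
--
-- def sequence_calculation(n):
--     """First n elements of 1 2 2 3 3 3 ...: position p (0-based) holds the
--     unique i with i*(i-1)/2 <= p < i*(i+1)/2, i.e. i = (isqrt(8p+1)+1)//2."""
--     return ''.join(str((_isqrt(8 * p + 1) + 1) // 2) for p in range(n))
-- ===== Notes on version B (the rewrite author's own statement) =====
-- stated objective: alternative
-- what changed: B computes the value at each position directly by the inverse triangular-number formula, taking an integer square root by binary search, instead of A's sequential accumulation of overshooting blocks followed by per-element str conversion and a slice; B trades A's linear block building for random-access position arithmetic and is slower by a log factor.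
import Mathlib
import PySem

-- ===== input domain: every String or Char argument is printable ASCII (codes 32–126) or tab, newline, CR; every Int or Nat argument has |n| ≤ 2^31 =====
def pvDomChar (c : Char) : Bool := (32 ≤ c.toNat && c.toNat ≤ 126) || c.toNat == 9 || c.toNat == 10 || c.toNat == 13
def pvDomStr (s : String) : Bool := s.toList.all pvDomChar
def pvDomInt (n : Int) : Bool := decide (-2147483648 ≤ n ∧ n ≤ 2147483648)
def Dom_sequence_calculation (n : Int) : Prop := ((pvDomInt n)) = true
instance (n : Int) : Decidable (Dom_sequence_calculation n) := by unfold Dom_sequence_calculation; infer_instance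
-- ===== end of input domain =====

-- B computes each position's value directly by the closed-form inverse triangular number
-- (isqrt(8p+1)+1)//2 with a binary-search integer sqrt, instead of A's sequential block
-- accumulation, per-element str conversion and slice; objective: alternative algorithm.


-- ===== PORT A =====
-- A's while loop: temp grows by [i]*i each pass while len(temp) < n; j encodes i-1 (i = j+1 ≥ 1).
def seqLoopA (n : Int) (temp : List Int) (j : Nat) : List Int :=
  if (temp.length : Int) < n then
    seqLoopA n (temp ++ List.replicate (j + 1) ((j : Int) + 1)) (j + 1)
  else temp
termination_by (n - temp.length).toNat
decreasing_by simp only [List.length_append, List.length_replicate]; omega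

def sequence_calculation (n : Int) : String :=
  let temp := seqLoopA n [] 0
  let sequence := PySem.List.slice (temp.map PySem.Int.toStr) none (some n)
  PySem.Str.join "" sequence

-- ===== PORT B =====
-- B's _isqrt: binary search with invariant lo*lo ≤ x < hi*hi.
def isqrtLoop (x lo hi : Int) : Int :=
  if 1 < hi - lo then
    if PySem.Int.floordiv (lo + hi) 2 * PySem.Int.floordiv (lo + hi) 2 ≤ x then
      isqrtLoop x (PySem.Int.floordiv (lo + hi) 2) hi
    else
      isqrtLoop x lo (PySem.Int.floordiv (lo + hi) 2)
  else lo
termination_by (hi - lo).toNat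
decreasing_by
  all_goals rw [PySem.Int.floordiv_eq_ediv_of_pos (by norm_num)]; omega

def isqrtB (x : Int) : Int := isqrtLoop x 0 (x + 1)

-- value at 0-based position p: (isqrt(8p+1)+1)//2
def valAt (p : Int) : Int := PySem.Int.floordiv (isqrtB (8 * p + 1) + 1) 2

def sequence_calculation_alt (n : Int) : String :=
  PySem.Str.join "" ((PySem.List.pyRange 0 n 1).map (fun p => PySem.Int.toStr (valAt p)))

-- ===== PRECONDITION & SPEC =====
def Spec_sequence_calculation (n : Int) (out : String) : Prop := out = sequence_calculation_alt n
instance (n : Int) (out : String) : Decidable (Spec_sequence_calculation n out) := by unfold Spec_sequence_calculation; infer_instance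

-- ===== CLAIM (what is proved, stated in full; the proofs are below) =====
def Claim_equal_sequence_calculation : Prop := ∀ (n : Int), Dom_sequence_calculation n → Spec_sequence_calculation n (sequence_calculation n)

-- ===== LEMMAS AND PROOFS =====

-- A's loop pulled free of its accumulator.
def restA (r : Int) (j : Nat) : List Int :=
  if 0 < r then List.replicate (j + 1) ((j : Int) + 1) ++ restA (r - (j + 1)) (j + 1) else []
termination_by r.toNat
decreasing_by omega

theorem seqLoopA_eq (n : Int) (temp : List Int) (j : Nat) :
    seqLoopA n temp j = temp ++ restA (n - temp.length) j := by
  induction temp, j using seqLoopA.induct n with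
  | case1 temp j h ih =>
    rw [seqLoopA, if_pos h, ih]
    conv_rhs => rw [restA, if_pos (by omega)]
    simp only [List.length_append, List.length_replicate, List.append_assoc]
    have hc1 : ((temp.length + (j + 1) : Nat) : Int) = ↑temp.length + ((j : Int) + 1) := by
      push_cast; ring
    have hc2 : (n : Int) - (↑temp.length + ((j : Int) + 1)) = n - ↑temp.length - ((j : Int) + 1) := by
      ring
    rw [hc1, hc2]
  | case2 temp j h =>
    rw [seqLoopA, if_neg h, restA.eq_def, if_neg (by omega)]
    simp

theorem restA_length (r : Int) (j : Nat) : r.toNat ≤ (restA r j).length := by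
  induction r, j using restA.induct with
  | case1 r j h ih =>
    rw [restA, if_pos h]
    simp only [List.length_append, List.length_replicate]
    omega
  | case2 r j h =>
    rw [restA, if_neg h]; simp; omega

-- binary-search invariant: from lo*lo ≤ x < hi*hi the loop returns the floor sqrt.
theorem isqrtLoop_spec (x lo hi : Int) (h1 : lo * lo ≤ x) (h2 : x < hi * hi) (h3 : lo < hi) :
    lo ≤ isqrtLoop x lo hi ∧ isqrtLoop x lo hi * isqrtLoop x lo hi ≤ x ∧
      x < (isqrtLoop x lo hi + 1) * (isqrtLoop x lo hi + 1) := by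
  induction lo, hi using isqrtLoop.induct x with
  | case1 lo hi hgt hle ih =>
    rw [isqrtLoop, if_pos hgt, if_pos hle]
    have hm := PySem.Int.floordiv_eq_ediv_of_pos (a := lo + hi) (by norm_num : (0:Int) < 2)
    have hmid : lo ≤ PySem.Int.floordiv (lo + hi) 2 ∧ PySem.Int.floordiv (lo + hi) 2 < hi := by
      rw [hm]; omega
    obtain ⟨ha, hb, hc⟩ := ih hle h2 hmid.2
    exact ⟨le_trans hmid.1 ha, hb, hc⟩
  | case2 lo hi hgt hle ih =>
    rw [isqrtLoop, if_pos hgt, if_neg hle]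
    have hm := PySem.Int.floordiv_eq_ediv_of_pos (a := lo + hi) (by norm_num : (0:Int) < 2)
    have hmid : lo < PySem.Int.floordiv (lo + hi) 2 := by rw [hm]; omega
    exact ih h1 (by omega) hmid
  | case3 lo hi hgt =>
    rw [isqrtLoop, if_neg hgt]
    have : hi = lo + 1 := by omega
    subst this
    exact ⟨le_refl _, h1, h2⟩

theorem isqrtB_spec (x : Int) (hx : 0 ≤ x) :
    0 ≤ isqrtB x ∧ isqrtB x * isqrtB x ≤ x ∧ x < (isqrtB x + 1) * (isqrtB x + 1) := by
  have := isqrtLoop_spec x 0 (x + 1) (by simpa using hx) (by nlinarith) (by omega)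
  exact this

-- p in the j-th block (triangular bounds) ⇒ valAt p = j+1.
theorem valAt_eq (j p : Nat) (h1 : j * (j + 1) / 2 ≤ p) (h2 : p < (j + 1) * (j + 2) / 2) :
    valAt (p : Int) = (j : Int) + 1 := by
  have d1 : 2 ∣ j * (j + 1) := (Nat.even_mul_succ_self j).two_dvd
  have d2 : 2 ∣ (j + 1) * (j + 2) := (Nat.even_mul_succ_self (j + 1)).two_dvd
  have hn1 : j * (j + 1) ≤ 2 * p := by omega
  have hn2 : 2 * p + 2 ≤ (j + 1) * (j + 2) := by omega
  have hp1 : (j : Int) * ((j : Int) + 1) ≤ 2 * (p : Int) := by exact_mod_cast hn1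
  have hp2 : 2 * (p : Int) + 2 ≤ ((j : Int) + 1) * ((j : Int) + 2) := by exact_mod_cast hn2
  obtain ⟨hs0, hs1, hs2⟩ := isqrtB_spec (8 * (p : Int) + 1) (by positivity)
  set s := isqrtB (8 * (p : Int) + 1) with hs
  have hlow : 2 * (j : Int) + 1 ≤ s := by nlinarith
  have hhigh : s ≤ 2 * (j : Int) + 2 := by nlinarith
  unfold valAt
  rw [← hs, PySem.Int.floordiv_eq_ediv_of_pos (by norm_num)]
  omega

-- T(j+1) = T j + (j+1)
theorem tri_succ (j : Nat) : (j + 1) * (j + 2) / 2 = j * (j + 1) / 2 + (j + 1) := by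
  have h : (j + 1) * (j + 2) = j * (j + 1) + 2 * (j + 1) := by ring
  have d1 : 2 ∣ j * (j + 1) := (Nat.even_mul_succ_self j).two_dvd
  omega

-- element p of the block list starting at number j+1 is valAt (p + T j).
theorem restA_get (r : Int) (j : Nat) (p : Nat) (hp : (p : Int) < r) :
    (restA r j)[p]? = some (valAt ((p : Int) + (j * (j + 1) / 2 : Nat))) := by
  induction r, j using restA.induct generalizing p with
  | case1 r j h ih =>
    rw [restA, if_pos h]
    by_cases hc : p < j + 1
    · rw [List.getElem?_append_left (by simpa using hc), List.getElem?_replicate, if_pos hc]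
      have hv := valAt_eq j (p + j * (j + 1) / 2) (by omega)
        (by rw [tri_succ]; omega)
      rw [show ((p : Int) + (j * (j + 1) / 2 : Nat)) = (((p + j * (j + 1) / 2 : Nat) : Int)) by
        push_cast; ring, hv]
    · rw [List.getElem?_append_right (by simpa using by omega)]
      simp only [List.length_replicate]
      rw [ih (p - (j + 1)) (by omega)]
      congr 2
      rw [tri_succ]
      push_cast [tri_succ]
      omega
  | case2 r j h =>
    exact absurd hp (by omega)

-- the two String lists being joined are equal.
theorem lists_eq (n : Int) (hn : 0 ≤ n) :
    ((restA n 0).take n.toNat).map PySem.Int.toStr =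
      (PySem.List.pyRange 0 n 1).map (fun p => PySem.Int.toStr (valAt p)) := by
  rw [PySem.List.pyRange_one]
  apply List.ext_getElem?
  intro k
  by_cases hk : k < n.toNat
  · rw [List.getElem?_map, List.getElem?_take_of_lt hk, restA_get n 0 k (by omega)]
    simp [hk]
  · have hl1 : (((restA n 0).take n.toNat).map PySem.Int.toStr).length = n.toNat := by
      simp only [List.length_map, List.length_take]
      have := restA_length n 0
      omega
    rw [List.getElem?_eq_none (by omega), List.getElem?_eq_none (by simp; omega)]

-- ===== VERDICT (by name: the statement is the Claim_ definition above) =====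
theorem sequence_calculation_spec : Claim_equal_sequence_calculation := by
  intro n _
  unfold Spec_sequence_calculation sequence_calculation sequence_calculation_alt
  rw [seqLoopA_eq]
  simp only [List.nil_append, List.length_nil, Int.ofNat_zero, sub_zero]
  by_cases hn : 0 ≤ n
  · rw [PySem.List.slice_to _ hn, ← List.map_take, lists_eq n hn]
  · rw [restA.eq_def, if_neg (by omega), PySem.List.pyRange_one_eq_nil (by omega)]
    simp [PySem.List.slice]
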